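-- pv_equiv track=rewrite | github.com/Aider-AI/aider | aider/coders/editblock_coder.py | perfect_replace
-- ===== SOURCE A (Python) =====
-- def perfect_replace(whole_lines, part_lines, replace_lines):
--     part_tup = tuple(part_lines)
--     part_len = len(part_lines)
--
--     for i in range(len(whole_lines) - part_len + 1):
--         whole_tup = tuple(whole_lines[i : i + part_len])
--         if part_tup == whole_tup:
--             res = whole_lines[:i] + replace_lines + whole_lines[i + part_len :]
--             return "".join(res)
-- ===== SOURCE B (Python) =====
-- def perfect_replace(whole_lines, part_lines, replace_lines):
--     # Rabin-Karp: rolling hash over the sequence of line hashes; verify on hash hit.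
--     k = len(part_lines)
--     n = len(whole_lines)
--     if k > n:
--         return None
--     MOD = 1000000007
--     BASE = 1000003
--
--     def lh(s):
--         h = 0
--         for ch in s:
--             h = (h * 131 + ord(ch)) % MOD
--         return h
--
--     target = 0
--     for s in part_lines:
--         target = (target * BASE + lh(s)) % MOD
--     h = 0
--     for s in whole_lines[:k]:
--         h = (h * BASE + lh(s)) % MOD
--     pw = pow(BASE, k - 1, MOD) if k > 0 else 0
--     i = 0
--     while True:
--         if h == target and whole_lines[i:i + k] == part_lines:
--             return "".join(whole_lines[:i] + replace_lines + whole_lines[i + k:])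
--         if i + k >= n:
--             return None
--         h = ((h - lh(whole_lines[i]) * pw) * BASE + lh(whole_lines[i + k])) % MOD
--         i += 1
-- ===== Notes on version B (the rewrite author's own statement) =====
-- stated objective: alternative
-- what changed: Replaces A's slice-and-compare of the k-line window at every offset by Rabin-Karp: a rolling polynomial hash over per-line hashes, with the full slice comparison performed only on a hash hit.
import Mathlib
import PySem

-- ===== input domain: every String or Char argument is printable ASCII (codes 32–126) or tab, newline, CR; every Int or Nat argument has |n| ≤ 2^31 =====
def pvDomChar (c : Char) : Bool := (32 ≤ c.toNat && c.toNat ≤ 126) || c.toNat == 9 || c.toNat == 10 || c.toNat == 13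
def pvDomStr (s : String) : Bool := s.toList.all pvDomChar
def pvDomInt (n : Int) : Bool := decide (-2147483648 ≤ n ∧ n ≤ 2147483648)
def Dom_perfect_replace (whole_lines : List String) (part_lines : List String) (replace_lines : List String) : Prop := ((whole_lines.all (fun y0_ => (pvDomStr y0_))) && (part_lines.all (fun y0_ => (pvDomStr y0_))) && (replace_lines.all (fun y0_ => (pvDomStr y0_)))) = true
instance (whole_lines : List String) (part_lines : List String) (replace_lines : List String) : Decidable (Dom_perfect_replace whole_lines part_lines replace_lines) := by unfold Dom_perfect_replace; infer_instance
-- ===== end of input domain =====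

-- B replaces A's slice-and-compare scan at every offset by Rabin-Karp (rolling hash over
-- line hashes, slice comparison only on a hash hit); same return value, alternative algorithm.

-- ===== PORT A =====
def pvALoop (wl pl rl : List String) (k : Int) : List Int → Option String
  | [] => none
  | i :: rest =>
      if PySem.List.slice wl (some i) (some (i + k)) = pl then
        some (PySem.Str.join "" (PySem.List.slice wl none (some i) ++ rl ++ PySem.List.slice wl (some (i + k)) none))
      else pvALoop wl pl rl k rest

def perfect_replace (whole_lines : List String) (part_lines : List String) (replace_lines : List String) : Option String :=
  let part_len : Int := part_lines.length
  pvALoop whole_lines part_lines replace_lines part_len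
    (PySem.List.pyRange 0 ((whole_lines.length : Int) - part_len + 1) 1)

-- ===== PORT B =====
def pvLh (s : String) : Int :=
  s.toList.foldl (fun h c => PySem.Int.mod (h * 131 + (c.toNat : Int)) 1000000007) 0

def pvHm (xs : List String) : Int :=
  xs.foldl (fun h s => PySem.Int.mod (h * 1000003 + pvLh s) 1000000007) 0

def pvBLoop (wl pl rl : List String) (k n pw target : Int) : Nat → Int → Int → Option String
  | 0, _, _ => none
  | fuel + 1, i, h =>
      if h = target ∧ PySem.List.slice wl (some i) (some (i + k)) = pl then
        some (PySem.Str.join "" (PySem.List.slice wl none (some i) ++ rl ++ PySem.List.slice wl (some (i + k)) none))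
      else if i + k ≥ n then none
      else pvBLoop wl pl rl k n pw target fuel (i + 1)
        (PySem.Int.mod ((h - pvLh (PySem.List.pyGetD wl i "") * pw) * 1000003
            + pvLh (PySem.List.pyGetD wl (i + k) "")) 1000000007)

def perfect_replace_alt (whole_lines : List String) (part_lines : List String) (replace_lines : List String) : Option String :=
  let k : Int := part_lines.length
  let n : Int := whole_lines.length
  if k > n then none
  else
    let target := pvHm part_lines
    let h0 := pvHm (PySem.List.slice whole_lines none (some k))
    let pw := if 0 < k then PySem.Int.powMod 1000003 (k - 1).toNat 1000000007 else 0
    pvBLoop whole_lines part_lines replace_lines k n pw target (n - k + 1).toNat 0 h0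

-- ===== PRECONDITION & SPEC =====
def Spec_perfect_replace (whole_lines : List String) (part_lines : List String) (replace_lines : List String) (out : Option String) : Prop := out = perfect_replace_alt whole_lines part_lines replace_lines
instance (whole_lines : List String) (part_lines : List String) (replace_lines : List String) (out : Option String) : Decidable (Spec_perfect_replace whole_lines part_lines replace_lines out) := by unfold Spec_perfect_replace; infer_instance

-- ===== CLAIM (what is proved, stated in full; the proofs are below) =====
def Claim_equal_perfect_replace : Prop := ∀ (whole_lines : List String) (part_lines : List String) (replace_lines : List String), Dom_perfect_replace whole_lines part_lines replace_lines → Spec_perfect_replace whole_lines part_lines replace_lines (perfect_replace whole_lines part_lines replace_lines)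

-- ===== LEMMAS AND PROOFS =====

-- the unreduced polynomial hash of a list of lines (proof-only helper)
def pvHraw (xs : List String) : Int := xs.foldl (fun a s => a * 1000003 + pvLh s) 0

lemma pvMod_eq (x : Int) : PySem.Int.mod x 1000000007 = x % 1000000007 :=
  PySem.Int.mod_eq_emod_of_pos (by norm_num)

lemma pvHraw_from (xs : List String) : ∀ a : Int,
    xs.foldl (fun a s => a * 1000003 + pvLh s) a = a * 1000003 ^ xs.length + pvHraw xs := by
  induction xs with
  | nil => intro a; simp [pvHraw]
  | cons x xs ih =>
      intro a
      simp only [List.foldl_cons, List.length_cons, pvHraw]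
      rw [ih, ih (0 * 1000003 + pvLh x)]
      ring

lemma pvFoldl_mod (xs : List String) : ∀ a : Int,
    xs.foldl (fun h s => (h * 1000003 + pvLh s) % 1000000007) (a % 1000000007)
      = (xs.foldl (fun a s => a * 1000003 + pvLh s) a) % 1000000007 := by
  induction xs with
  | nil => intro a; simp
  | cons x xs ih =>
      intro a
      simp only [List.foldl_cons]
      have h1 : (a % 1000000007 * 1000003 + pvLh x) % 1000000007
          = (a * 1000003 + pvLh x) % 1000000007 := by
        have : a % 1000000007 ≡ a [ZMOD 1000000007] := Int.emod_emod_of_dvd a dvd_rfl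
        exact (this.mul_right 1000003).add_right (pvLh x)
      rw [h1, ← ih (a * 1000003 + pvLh x)]

lemma pvHm_eq (xs : List String) : pvHm xs = pvHraw xs % 1000000007 := by
  have := pvFoldl_mod xs 0
  simpa [pvHm, pvHraw, pvMod_eq] using this

lemma pvRoll (wl : List String) (k' i : Nat) (hik : i + (k' + 1) < wl.length) :
    ((pvHm ((wl.drop i).take (k' + 1)) - pvLh (wl.getD i "") * ((1000003 : Int) ^ k' % 1000000007)) * 1000003
        + pvLh (wl.getD (i + (k' + 1)) "")) % 1000000007
      = pvHm ((wl.drop (i + 1)).take (k' + 1)) := by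
  have hi : i < wl.length := by omega
  have hik' : i + (k' + 1) < wl.length := hik
  set mid := (wl.drop (i + 1)).take k' with hmid
  have hwin1 : (wl.drop i).take (k' + 1) = wl[i] :: mid := by
    rw [List.drop_eq_getElem_cons hi, List.take_succ_cons]
  have hdlen : k' ≤ (wl.drop (i + 1)).length := by simp; omega
  have hy : (wl.drop (i + 1))[k']? = some wl[i + (k' + 1)] := by
    rw [List.getElem?_drop]
    have : i + 1 + k' = i + (k' + 1) := by omega
    rw [this, List.getElem?_eq_getElem hik']
  have hwin2 : (wl.drop (i + 1)).take (k' + 1) = mid ++ [wl[i + (k' + 1)]] := by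
    rw [List.take_add_one, hy, hmid]; rfl
  have hmidlen : mid.length = k' := by
    rw [hmid, List.length_take]; simp; omega
  have hgd1 : wl.getD i "" = wl[i] := List.getD_eq_getElem wl "" hi
  have hgd2 : wl.getD (i + (k' + 1)) "" = wl[i + (k' + 1)] := List.getD_eq_getElem wl "" hik'
  rw [hwin1, hwin2, hgd1, hgd2, pvHm_eq, pvHm_eq]
  have hraw1 : pvHraw (wl[i] :: mid) = pvLh wl[i] * 1000003 ^ k' + pvHraw mid := by
    show (wl[i] :: mid).foldl (fun a s => a * 1000003 + pvLh s) 0 = _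
    rw [List.foldl_cons, pvHraw_from]
    rw [hmidlen]; ring
  have hraw2 : pvHraw (mid ++ [wl[i + (k' + 1)]]) = pvHraw mid * 1000003 + pvLh wl[i + (k' + 1)] := by
    show (mid ++ _).foldl (fun a s => a * 1000003 + pvLh s) 0 = _
    rw [List.foldl_append]
    rfl
  rw [hraw1, hraw2]
  set P : Int := (1000003 : Int) ^ k'
  set a : Int := pvLh wl[i]
  set r : Int := pvHraw mid
  set c : Int := pvLh wl[i + (k' + 1)]
  have h1 : ((a * P + r) % 1000000007 - a * (P % 1000000007))
      ≡ ((a * P + r) - a * P) [ZMOD 1000000007] :=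
    Int.ModEq.sub (Int.emod_emod_of_dvd _ dvd_rfl)
      ((show P % 1000000007 ≡ P [ZMOD 1000000007] from Int.emod_emod_of_dvd P dvd_rfl).mul_left a)
  have h2 := (h1.mul_right 1000003).add_right c
  have h3 : ((a * P + r) - a * P) * 1000003 + c = r * 1000003 + c := by ring
  rw [h3] at h2
  exact h2

lemma pvLoop_eq (wl pl rl : List String) (kN : Nat) (hk : kN = pl.length)
    (hkn : kN ≤ wl.length) :
    ∀ (m i : Nat), i + m = wl.length - kN + 1 →
      pvALoop wl pl rl (kN : Int) (PySem.List.pyRange (i : Int) ((wl.length : Int) - (kN : Int) + 1) 1)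
        = pvBLoop wl pl rl (kN : Int) (wl.length : Int)
            (if 0 < (kN : Int) then PySem.Int.powMod 1000003 ((kN : Int) - 1).toNat 1000000007 else 0)
            (pvHm pl) m (i : Int) (pvHm ((wl.drop i).take kN)) := by
  intro m
  induction m with
  | zero =>
      intro i hi
      have hb : (wl.length : Int) - (kN : Int) + 1 ≤ (i : Int) := by omega
      rw [PySem.List.pyRange_one_eq_nil hb]
      rfl
  | succ m ih =>
      intro i hi
      have hilt : (i : Int) < (wl.length : Int) - (kN : Int) + 1 := by omega
      rw [PySem.List.pyRange_one_cons hilt]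
      simp only [pvALoop, pvBLoop]
      have hcast : (i : Int) + (kN : Int) = ((i + kN : Nat) : Int) := by push_cast; ring
      have hslice : PySem.List.slice wl (some (i : Int)) (some ((i : Int) + (kN : Int))) = (wl.drop i).take kN :=
        PySem.List.slice_natCast_add wl i kN
      by_cases hm : (wl.drop i).take kN = pl
      · have htgt : pvHm ((wl.drop i).take kN) = pvHm pl := by rw [hm]
        rw [hslice, if_pos hm, if_pos ⟨htgt, hm⟩]
      · rw [hslice, if_neg hm, if_neg (by exact fun h => hm h.2)]
        have hkpos : 0 < kN := by
          rcases Nat.eq_zero_or_pos kN with h0 | h0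
          · exfalso; apply hm
            have hpl : pl = [] := List.length_eq_zero_iff.mp (by omega)
            simp [h0, hpl]
          · exact h0
        by_cases hend : i + kN ≥ wl.length
        · have : (i : Int) + (kN : Int) ≥ (wl.length : Int) := by omega
          rw [if_pos this]
          have : (wl.length : Int) - (kN : Int) + 1 ≤ (i : Int) + 1 := by omega
          rw [PySem.List.pyRange_one_eq_nil this]
          rfl
        · have hlt : ¬ ((i : Int) + (kN : Int) ≥ (wl.length : Int)) := by omega
          rw [if_neg hlt]
          obtain ⟨k', rfl⟩ : ∃ k', kN = k' + 1 := ⟨kN - 1, by omega⟩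
          have hupd : PySem.Int.mod
              ((pvHm ((wl.drop i).take (k' + 1))
                  - pvLh (PySem.List.pyGetD wl (i : Int) "")
                    * (if 0 < ((k' + 1 : Nat) : Int) then PySem.Int.powMod 1000003 (((k' + 1 : Nat) : Int) - 1).toNat 1000000007 else 0)) * 1000003
                + pvLh (PySem.List.pyGetD wl ((i : Int) + ((k' + 1 : Nat) : Int)) "")) 1000000007
              = pvHm ((wl.drop (i + 1)).take (k' + 1)) := by
            have hpw : (if 0 < ((k' + 1 : Nat) : Int) then PySem.Int.powMod 1000003 (((k' + 1 : Nat) : Int) - 1).toNat 1000000007 else 0)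
                = (1000003 : Int) ^ k' % 1000000007 := by
              rw [if_pos (by push_cast; omega), PySem.Int.powMod_eq, pvMod_eq,
                (show (((k' + 1 : Nat) : Int) - 1).toNat = k' by omega)]
            rw [hpw, hcast]
            rw [PySem.List.pyGetD_natCast, PySem.List.pyGetD_natCast, pvMod_eq]
            exact pvRoll wl k' i (by omega)
          rw [hupd]
          have hcast1 : (i : Int) + 1 = ((i + 1 : Nat) : Int) := by push_cast; ring
          rw [hcast1]
          exact ih (i + 1) (by omega)

lemma pv_eq (wl pl rl : List String) : perfect_replace wl pl rl = perfect_replace_alt wl pl rl := by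
  simp only [perfect_replace, perfect_replace_alt]
  by_cases hgt : (pl.length : Int) > (wl.length : Int)
  · rw [if_pos hgt]
    have : (wl.length : Int) - (pl.length : Int) + 1 ≤ 0 := by omega
    rw [PySem.List.pyRange_one_eq_nil this]
    rfl
  · rw [if_neg hgt]
    have hkn : pl.length ≤ wl.length := by omega
    have hfuel : ((wl.length : Int) - (pl.length : Int) + 1).toNat = wl.length - pl.length + 1 := by omega
    have hslice0 : PySem.List.slice wl none (some (pl.length : Int)) = wl.take pl.length :=
      PySem.List.slice_to_natCast wl pl.length
    rw [hfuel, hslice0]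
    have := pvLoop_eq wl pl rl pl.length rfl hkn (wl.length - pl.length + 1) 0 (by omega)
    simpa using this

-- ===== VERDICT (by name: the statement is the Claim_ definition above) =====
theorem perfect_replace_spec : Claim_equal_perfect_replace := by
  intro wl pl rl _
  show perfect_replace wl pl rl = perfect_replace_alt wl pl rl
  exact pv_eq wl pl rl
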